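-- pv_equiv track=rewrite | github.com/snuchhi/DB-Benchmark-project | benchmark-project.py | generate_string4
-- ===== SOURCE A (Python) =====
-- def generate_string4(tupCount):
--     result = list()
--     u = tupCount
--     n = ''
--     for i in range(52):
--         result.append('x')
--     if u % 4 == 0:
--         for j in range(4):
--             result[j] = 'A'
--     if u % 4 == 1:
--         for j in range(4):
--             result[j] = 'H'
--     if u % 4 == 2:
--         for j in range(4):
--             result[j] = 'O'
--     if u % 4 == 3:
--         for j in range(4):
--             result[j] = 'V'
-- #convert the list to string
--     for x in result:
--         n += x
--     return n
-- ===== SOURCE B (Python) =====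
-- _PREFIX = {0: 'A', 1: 'H', 2: 'O', 3: 'V'}
--
-- def generate_string4(tupCount):
--     return _PREFIX[tupCount % 4] * 4 + 'x' * 48
-- ===== Notes on version B (the rewrite author's own statement) =====
-- stated objective: simpler
-- what changed: Replaces the three-pass construction (append 'x' 52 times, branch-and-overwrite the first 4 slots, then fold the list into a string) with a closed-form expression: one table lookup keyed on tupCount % 4, string repetition and concatenation; no loops and no intermediate list.
import Mathlib
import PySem

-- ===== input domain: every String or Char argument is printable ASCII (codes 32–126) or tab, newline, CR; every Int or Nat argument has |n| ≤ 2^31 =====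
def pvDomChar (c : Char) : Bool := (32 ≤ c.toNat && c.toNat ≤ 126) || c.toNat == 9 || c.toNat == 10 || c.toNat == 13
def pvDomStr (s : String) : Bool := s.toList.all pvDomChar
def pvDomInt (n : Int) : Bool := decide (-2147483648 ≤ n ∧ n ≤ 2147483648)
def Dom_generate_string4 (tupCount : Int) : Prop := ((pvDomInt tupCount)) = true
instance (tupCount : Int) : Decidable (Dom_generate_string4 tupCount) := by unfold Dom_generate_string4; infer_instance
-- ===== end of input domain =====

-- B replaces A's three-pass loop construction by a closed-form table lookup + repetition (objective: simpler).

-- ===== PORT A =====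
def generate_string4 (tupCount : Int) : String :=
  -- result = []; for i in range(52): result.append('x')
  let result : List Char := (PySem.List.pyRange 0 52 1).foldl (fun acc _ => acc ++ ['x']) []
  -- if u % 4 == k: for j in range(4): result[j] = <letter>   (j ∈ [0,4) so j.toNat is exact)
  let result := if PySem.Int.mod tupCount 4 = 0 then
      (PySem.List.pyRange 0 4 1).foldl (fun r j => r.set j.toNat 'A') result else result
  let result := if PySem.Int.mod tupCount 4 = 1 then
      (PySem.List.pyRange 0 4 1).foldl (fun r j => r.set j.toNat 'H') result else result
  let result := if PySem.Int.mod tupCount 4 = 2 then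
      (PySem.List.pyRange 0 4 1).foldl (fun r j => r.set j.toNat 'O') result else result
  let result := if PySem.Int.mod tupCount 4 = 3 then
      (PySem.List.pyRange 0 4 1).foldl (fun r j => r.set j.toNat 'V') result else result
  -- n = ''; for x in result: n += x
  result.foldl (fun n x => n.push x) ""

-- ===== PORT B =====
def pvPrefixTable : PySem.Dict Int Char :=
  PySem.Dict.ofList [(0, 'A'), (1, 'H'), (2, 'O'), (3, 'V')]

def generate_string4_alt (tupCount : Int) : String :=
  -- _PREFIX[tupCount % 4]: the key tupCount % 4 is always in the table (0 ≤ mod < 4), so getD's default is never used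
  let c := (PySem.Dict.get? pvPrefixTable (PySem.Int.mod tupCount 4)).getD 'x'
  String.ofList (List.replicate 4 c) ++ String.ofList (List.replicate 48 'x')

-- ===== PRECONDITION & SPEC =====
def Spec_generate_string4 (tupCount : Int) (out : String) : Prop := out = generate_string4_alt tupCount
instance (tupCount : Int) (out : String) : Decidable (Spec_generate_string4 tupCount out) := by unfold Spec_generate_string4; infer_instance

-- ===== CLAIM (what is proved, stated in full; the proofs are below) =====
def Claim_equal_generate_string4 : Prop := ∀ (tupCount : Int), Dom_generate_string4 tupCount → Spec_generate_string4 tupCount (generate_string4 tupCount)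

-- ===== LEMMAS AND PROOFS =====
theorem pvMod4_cases (t : Int) :
    PySem.Int.mod t 4 = 0 ∨ PySem.Int.mod t 4 = 1 ∨ PySem.Int.mod t 4 = 2 ∨ PySem.Int.mod t 4 = 3 := by
  rw [PySem.Int.mod_eq_emod_of_pos (by norm_num)]
  omega

-- ===== VERDICT (by name: the statement is the Claim_ definition above) =====
theorem generate_string4_spec : Claim_equal_generate_string4 := by
  intro t _
  unfold Spec_generate_string4 generate_string4 generate_string4_alt
  rcases pvMod4_cases t with h | h | h | h <;> rw [h] <;> (apply String.toList_inj.mp; simp [pvPrefixTable, PySem.List.pyRange_one, List.range_succ]; decide)
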